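-- pv_equiv track=rewrite | github.com/gearbot/GearBot | GearBot/Util/Pages.py | paginate_fields
-- ===== SOURCE A (Python) =====
-- def paginate(input, max_lines=20, max_chars=1900, prefix="", suffix=""):
--     max_chars -= len(prefix) + len(suffix)
--     lines = str(input).splitlines(keepends=True)
--     pages = []
--     page = ""
--     count = 0
--     for line in lines:
--         if len(page) + len(line) > max_chars or count == max_lines:
--             if page == "":
--                 # single 2k line, split smaller
--                 words = line.split(" ")
--                 for word in words:
--                     if len(page) + len(word) > max_chars:
--                         pages.append(f"{prefix}{page}{suffix}")
--                         page = f"{word} "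
--                     else:
--                         page += f"{word} "
--             else:
--                 pages.append(f"{prefix}{page}{suffix}")
--                 page = line
--                 count = 1
--         else:
--             page += line
--         count += 1
--     pages.append(f"{prefix}{page}{suffix}")
--     return pages
--
-- def paginate_fields(input):
--     pages = []
--     for page in input:
--         page_fields = dict()
--         for name, content in page.items():
--             page_fields[name] = paginate(content, max_chars=1024)
--         pages.append(page_fields)
--     real_pages = []
--     for page in pages:
--         page_count = 0
--         page_fields = dict()
--         for name, parts in page.items():
--             base_name = name
--             if len(parts) is 1:
--                 if page_count + len(name) + len(parts[0]) > 4000: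
--                     real_pages.append(page_fields)
--                     page_fields = dict()
--                     page_count = 0
--                 page_fields[name] = parts[0]
--                 page_count += len(name) + len(parts[0])
--             else:
--                 for i in range(len(parts)):
--                     part = parts[i]
--                     name = f"{base_name} ({i+1}/{len(parts)})"
--                     if page_count + len(name) + len(part) > 3000:
--                         real_pages.append(page_fields)
--                         page_fields = dict()
--                         page_count = 0
--                     page_fields[name] = part
--                     page_count += len(name) + len(part)
--         real_pages.append(page_fields)
--     return real_pages
-- ===== SOURCE B (Python) =====
-- def paginate(input, max_lines=20, max_chars=1900, prefix="", suffix=""):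
--     max_chars -= len(prefix) + len(suffix)
--     lines = str(input).splitlines(keepends=True)
--     pages = []
--     page = ""
--     count = 0
--     for line in lines:
--         if len(page) + len(line) > max_chars or count == max_lines:
--             if page == "":
--                 # single 2k line, split smaller
--                 words = line.split(" ")
--                 for word in words:
--                     if len(page) + len(word) > max_chars:
--                         pages.append(f"{prefix}{page}{suffix}")
--                         page = f"{word} "
--                     else:
--                         page += f"{word} "
--             else:
--                 pages.append(f"{prefix}{page}{suffix}")
--                 page = line
--                 count = 1
--         else:
--             page += line
--         count += 1
--     pages.append(f"{prefix}{page}{suffix}")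
--     return pages
--
--
-- def paginate_fields(input):
--     real_pages = []
--     for page in input:
--         # flatten: one (key, value, limit) entry per final field
--         entries = []
--         for name, content in page.items():
--             parts = paginate(content, max_chars=1024)
--             if len(parts) == 1:
--                 entries.append((name, parts[0], 4000))
--             else:
--                 n = len(parts)
--                 entries.extend((f"{name} ({i + 1}/{n})", part, 3000)
--                                for i, part in enumerate(parts))
--         # single greedy packing pass over the flat entries
--         cur = {}
--         size = 0
--         for key, val, limit in entries:
--             if size + len(key) + len(val) > limit:
--                 real_pages.append(cur)
--                 cur = {}
--                 size = 0
--             cur[key] = val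
--             size += len(key) + len(val)
--         real_pages.append(cur)
--     return real_pages
-- ===== Notes on version B (the rewrite author's own statement) =====
-- stated objective: alternative
-- what changed: B replaces A's two-phase pipeline (first build a dict of name->paginated-parts per page, then a nested packing loop with the overflow check written twice for the 4000/3000 cases) by flattening each page's fields into one flat list of final (key, value, limit) entries and packing them with a single greedy loop per page.
import Mathlib
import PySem

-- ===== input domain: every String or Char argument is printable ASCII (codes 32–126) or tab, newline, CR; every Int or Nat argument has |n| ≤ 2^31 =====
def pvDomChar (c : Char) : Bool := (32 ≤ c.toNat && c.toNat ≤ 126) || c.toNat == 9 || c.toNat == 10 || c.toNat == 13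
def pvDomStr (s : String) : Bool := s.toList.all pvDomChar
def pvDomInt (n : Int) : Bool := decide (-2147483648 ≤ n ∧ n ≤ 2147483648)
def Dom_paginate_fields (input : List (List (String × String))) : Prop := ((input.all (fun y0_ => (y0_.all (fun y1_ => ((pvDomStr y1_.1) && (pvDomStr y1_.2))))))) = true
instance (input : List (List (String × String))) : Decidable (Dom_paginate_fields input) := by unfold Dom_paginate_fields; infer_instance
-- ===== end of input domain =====

-- B re-decomposes paginate_fields: per input page it first FLATTENS the fields into a list of
-- final (key, value, limit) entries, then packs them with ONE greedy loop, instead of A's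
-- two-phase dict-of-parts build followed by a nested packing loop with the check written twice.

-- ===== PORT A =====

-- str.splitlines(keepends=True), hand-ported: exact on the Dom alphabet, whose only
-- line-break characters are '\n', '\r' and '\r\n' (Python's extra Unicode breaks are outside Dom).
def pvSplitlinesKeep (cs : List Char) (acc : List Char) : List String :=
  match cs, acc with
  | [], acc => if acc.isEmpty then [] else [String.mk acc.reverse]
  | '\r' :: '\n' :: rest, acc => String.mk (acc.reverse ++ ['\r', '\n']) :: pvSplitlinesKeep rest []
  | '\n' :: rest, acc => String.mk (acc.reverse ++ ['\n']) :: pvSplitlinesKeep rest []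
  | '\r' :: rest, acc => String.mk (acc.reverse ++ ['\r']) :: pvSplitlinesKeep rest []
  | c :: rest, acc => pvSplitlinesKeep rest (c :: acc)

-- body of paginate's inner 'for word in words' loop
def pvPagWordStep (max_chars : Int) (pfx sfx : String) (st : List String × String) (word : String) : List String × String :=
  if PySem.Str.len st.2 + PySem.Str.len word > max_chars then
    (st.1 ++ [pfx ++ st.2 ++ sfx], word ++ " ")
  else
    (st.1, st.2 ++ word ++ " ")

-- body of paginate's 'for line in lines' loop, state = (pages, page, count)
def pvPagLineStep (max_lines max_chars : Int) (pfx sfx : String) (st : List String × String × Int) (line : String) : List String × String × Int :=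
  let (pages, page, count) := st
  if PySem.Str.len page + PySem.Str.len line > max_chars || count == max_lines then
    if page == "" then
      -- line.split(" "): sep ≠ "", ported via Chars.splitOn
      let words := (PySem.Chars.splitOn line.toList [' ']).map String.mk
      let (pages, page) := words.foldl (pvPagWordStep max_chars pfx sfx) (pages, page)
      (pages, page, count + 1)
    else
      (pages ++ [pfx ++ page ++ sfx], line, 1 + 1)
  else
    (pages, page ++ line, count + 1)

-- paginate(input, max_lines, max_chars, prefix, suffix); str(input) = input on a str argument
def pvPaginate (input : String) (max_lines max_chars : Int) (pfx sfx : String) : List String :=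
  let mc := max_chars - (PySem.Str.len pfx + PySem.Str.len sfx)
  let lines := pvSplitlinesKeep input.toList []
  let res := lines.foldl (pvPagLineStep max_lines mc pfx sfx) ([], "", 0)
  res.1 ++ [pfx ++ res.2.1 ++ sfx]

-- f"{base_name} ({i+1}/{len(parts)})"
def pvFieldName (base : String) (i : Int) (n : Int) : String :=
  base ++ " (" ++ PySem.Int.toStr (i + 1) ++ "/" ++ PySem.Int.toStr n ++ ")"

-- body of A's 'for name, parts in page.items()' loop; state = (real_pages, page_fields, page_count)
def pvPackFieldA (st : List (List (String × String)) × PySem.Dict String String × Int) (np : String × List String) : List (List (String × String)) × PySem.Dict String String × Int :=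
  let (real_pages, page_fields, page_count) := st
  let (name, parts) := np
  if parts.length == 1 then
    let p0 := parts.headD ""
    let (real_pages, page_fields, page_count) :=
      if page_count + PySem.Str.len name + PySem.Str.len p0 > 4000 then
        (real_pages ++ [page_fields.items], PySem.Dict.empty, 0)
      else (real_pages, page_fields, page_count)
    (real_pages, page_fields.insert name p0, page_count + PySem.Str.len name + PySem.Str.len p0)
  else
    (PySem.List.enumerate parts).foldl (fun st ip =>
      let (real_pages, page_fields, page_count) := st
      let nm := pvFieldName name ip.1 parts.length
      let (real_pages, page_fields, page_count) :=
        if page_count + PySem.Str.len nm + PySem.Str.len ip.2 > 3000 then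
          (real_pages ++ [page_fields.items], PySem.Dict.empty, 0)
        else (real_pages, page_fields, page_count)
      (real_pages, page_fields.insert nm ip.2, page_count + PySem.Str.len nm + PySem.Str.len ip.2)) st

def paginate_fields (input : List (List (String × String))) : List (List (String × String)) :=
  -- first loop: pages.append({name: paginate(content, max_chars=1024)})
  let pages : List (PySem.Dict String (List String)) :=
    input.foldl (fun acc page =>
      acc ++ [page.foldl (fun d nc => d.insert nc.1 (pvPaginate nc.2 20 1024 "" "")) PySem.Dict.empty]) []
  -- second loop: pack the fields of each page
  pages.foldl (fun real_pages page =>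
    let res := page.items.foldl pvPackFieldA (real_pages, PySem.Dict.empty, 0)
    res.1 ++ [res.2.1.items]) []

-- ===== PORT B =====

-- one field → its flat list of final (key, value, limit) entries
def pvFlattenField (nc : String × String) : List (String × String × Int) :=
  let parts := pvPaginate nc.2 20 1024 "" ""
  match parts with
  | [p] => [(nc.1, p, 4000)]
  | _ => (PySem.List.enumerate parts).map (fun ip => (pvFieldName nc.1 ip.1 parts.length, ip.2, 3000))

-- one step of the single greedy packing pass; state = (real_pages, cur, size)
def pvPackB (st : List (List (String × String)) × PySem.Dict String String × Int) (e : String × String × Int) : List (List (String × String)) × PySem.Dict String String × Int :=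
  let (real_pages, cur, size) := st
  let (real_pages, cur, size) :=
    if size + PySem.Str.len e.1 + PySem.Str.len e.2.1 > e.2.2 then
      (real_pages ++ [cur.items], PySem.Dict.empty, 0)
    else (real_pages, cur, size)
  (real_pages, cur.insert e.1 e.2.1, size + PySem.Str.len e.1 + PySem.Str.len e.2.1)

def paginate_fields_alt (input : List (List (String × String))) : List (List (String × String)) :=
  input.foldl (fun real_pages page =>
    let entries := page.foldl (fun es nc => es ++ pvFlattenField nc) []
    let res := entries.foldl pvPackB (real_pages, PySem.Dict.empty, 0)
    res.1 ++ [res.2.1.items]) []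

-- ===== PRECONDITION & SPEC =====
-- Pre_ excludes pages with duplicate field names: a Python dict (A's and B's argument) cannot
-- represent them, so the assoc-list encoding of such an input is ambiguous and A's
-- last-value-wins collapse at the dict boundary is an artefact of the encoding.
def Pre_paginate_fields (input : List (List (String × String))) : Prop :=
  ∀ page ∈ input, (page.map Prod.fst).Nodup
instance (input : List (List (String × String))) : Decidable (Pre_paginate_fields input) := by unfold Pre_paginate_fields; infer_instance

def pvWitness_paginate_fields : (List (List (String × String))) := [[("a", "hello"), ("b", "world")], []]

def Spec_paginate_fields (input : List (List (String × String))) (out : List (List (String × String))) : Prop := out = paginate_fields_alt input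
instance (input : List (List (String × String))) (out : List (List (String × String))) : Decidable (Spec_paginate_fields input out) := by unfold Spec_paginate_fields; infer_instance

-- ===== CLAIM (what is proved, stated in full; the proofs are below) =====
def Claim_equal_paginate_fields : Prop := ∀ (input : List (List (String × String))), Dom_paginate_fields input → Pre_paginate_fields input → Spec_paginate_fields input (paginate_fields input)

-- ===== LEMMAS AND PROOFS =====

-- per field: A's inline packing of (name, parts) = B's flatten-then-pack of the same field
theorem packA_flatten (st : List (List (String × String)) × PySem.Dict String String × Int)
    (nc : String × String) :
    pvPackFieldA st (nc.1, pvPaginate nc.2 20 1024 "" "") = (pvFlattenField nc).foldl pvPackB st := by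
  simp only [pvFlattenField]
  generalize pvPaginate nc.2 20 1024 "" "" = parts
  match parts with
  | [] => simp [pvPackFieldA, PySem.List.enumerate]
  | [p] => simp [pvPackFieldA, pvPackB]
  | p :: q :: rest =>
    simp only [pvPackFieldA, List.length_cons]
    rw [if_neg (by simp), List.foldl_map]
    apply PySem.List.foldl_congr_mem
    intro acc ip _
    simp [pvPackB]

-- first-phase dict of one page: with distinct field names its items are just the mapped list
theorem stage1_items (page : List (String × String)) (h : (page.map Prod.fst).Nodup) :
    (page.foldl (fun d nc => d.insert nc.1 (pvPaginate nc.2 20 1024 "" "")) PySem.Dict.empty).items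
      = page.map (fun nc => (nc.1, pvPaginate nc.2 20 1024 "" "")) := by
  have := PySem.Dict.items_foldl_insert_fresh page (fun nc => nc.1)
    (fun nc => pvPaginate nc.2 20 1024 "" "") PySem.Dict.empty
    (fun a _ => PySem.Dict.contains_empty _) (by simpa using h)
  simpa using this

-- one page: A's nested packing of the stage-1 dict = B's single pass over the flat entries
theorem page_eq (rp : List (List (String × String))) (page : List (String × String))
    (h : (page.map Prod.fst).Nodup) :
    (let res := (page.foldl (fun d nc => d.insert nc.1 (pvPaginate nc.2 20 1024 "" "")) PySem.Dict.empty).items.foldl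
        pvPackFieldA (rp, PySem.Dict.empty, 0)
     res.1 ++ [res.2.1.items])
    = (let entries := page.foldl (fun es nc => es ++ pvFlattenField nc) []
       let res := entries.foldl pvPackB (rp, PySem.Dict.empty, 0)
       res.1 ++ [res.2.1.items]) := by
  show ((page.foldl (fun d nc => d.insert nc.1 (pvPaginate nc.2 20 1024 "" "")) PySem.Dict.empty).items.foldl
          pvPackFieldA (rp, PySem.Dict.empty, 0)).1 ++
        [((page.foldl (fun d nc => d.insert nc.1 (pvPaginate nc.2 20 1024 "" "")) PySem.Dict.empty).items.foldl
          pvPackFieldA (rp, PySem.Dict.empty, 0)).2.1.items]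
      = ((page.foldl (fun es nc => es ++ pvFlattenField nc) []).foldl pvPackB (rp, PySem.Dict.empty, 0)).1 ++
        [((page.foldl (fun es nc => es ++ pvFlattenField nc) []).foldl pvPackB (rp, PySem.Dict.empty, 0)).2.1.items]
  rw [stage1_items page h, List.foldl_map, PySem.List.foldl_append_eq_flatMap, List.nil_append,
    List.foldl_flatMap]
  exact congrArg (fun r => r.1 ++ [r.2.1.items])
    (PySem.List.foldl_congr_mem page _ _ _ (fun acc nc _ => packA_flatten acc nc))

-- foldl-append accumulation is map
theorem foldl_append_singleton_eq_map {A B : Type} (f : A → B) :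
    ∀ (l : List A) (acc : List B), l.foldl (fun a x => a ++ [f x]) acc = acc ++ l.map f := by
  intro l
  induction l with
  | nil => simp
  | cons x xs ih => intro acc; simp [ih, List.append_assoc]

-- ===== VERDICT (by name: the statement is the Claim_ definition above) =====
theorem paginate_fields_spec : Claim_equal_paginate_fields := by
  intro input _ hpre
  unfold Spec_paginate_fields paginate_fields paginate_fields_alt
  rw [foldl_append_singleton_eq_map, List.nil_append, List.foldl_map]
  exact PySem.List.foldl_congr_mem input _ _ [] (fun acc page hmem => page_eq acc page (hpre page hmem))
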